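-- pv_equiv track=rewrite | github.com/jungsun-eoh/computer_network_lab | labs/lab0/lab0.py | merge_odds
-- ===== SOURCE A (Python) =====
-- def merge_odds(l1, l2):
--     odds = {}
--     for i in range(len(l1)):
--         if l1[i] % 2:
--             odds[i] = [l1[i]]
--     for i in range(len(l2)):
--         if l2[i] % 2:
--             if odds.get(i):
--                 odds[i] = [odds.get(i)[0], l2[i]]
--             else:
--                 odds[i] = [l2[i]]
--     return odds
-- ===== SOURCE B (Python) =====
-- def merge_odds(l1, l2):
--     n1, n2 = len(l1), len(l2)
--     pairs = [(i, [v] + ([l2[i]] if i < n2 and l2[i] % 2 else []))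
--              for i, v in enumerate(l1) if v % 2]
--     pairs += [(i, [v]) for i, v in enumerate(l2)
--               if v % 2 and not (i < n1 and l1[i] % 2)]
--     return dict(pairs)
-- ===== Notes on version B (the rewrite author's own statement) =====
-- stated objective: alternative
-- what changed: A builds the dict by mutation in two passes (insert from l1, then read-and-update each entry from l2); B computes each key's final value once, building the two disjoint key groups as comprehensions and calling dict() a single time, with no dict reads or updates.
import Mathlib
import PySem

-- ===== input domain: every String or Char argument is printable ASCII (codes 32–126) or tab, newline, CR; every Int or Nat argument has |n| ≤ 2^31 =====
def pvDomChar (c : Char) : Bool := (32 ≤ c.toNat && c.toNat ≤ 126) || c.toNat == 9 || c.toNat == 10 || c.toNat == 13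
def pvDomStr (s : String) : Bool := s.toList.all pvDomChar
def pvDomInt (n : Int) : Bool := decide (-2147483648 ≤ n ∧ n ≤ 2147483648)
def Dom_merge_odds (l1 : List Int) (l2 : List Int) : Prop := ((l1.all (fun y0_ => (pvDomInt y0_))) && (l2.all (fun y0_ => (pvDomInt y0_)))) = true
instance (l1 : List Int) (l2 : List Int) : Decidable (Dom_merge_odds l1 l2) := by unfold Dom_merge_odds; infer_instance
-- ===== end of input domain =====

-- B replaces A's two mutate-and-update dict passes by write-once comprehensions over the
-- two disjoint key groups, merged by a single dict() call (alternative decomposition, same cost).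


-- ===== PORT A =====
def merge_odds (l1 : List Int) (l2 : List Int) : List (Int × List Int) :=
  let odds : PySem.Dict Int (List Int) := PySem.Dict.empty
  let odds := (PySem.List.pyRange 0 (l1.length : Int) 1).foldl (fun d i =>
    if PySem.Int.mod (PySem.List.pyGetD l1 i 0) 2 ≠ 0 then
      d.insert i [PySem.List.pyGetD l1 i 0]
    else d) odds
  let odds := (PySem.List.pyRange 0 (l2.length : Int) 1).foldl (fun d i =>
    if PySem.Int.mod (PySem.List.pyGetD l2 i 0) 2 ≠ 0 then
      match d.get? i with           -- odds.get(i): truthy iff present and non-empty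
      | some v =>
        if v ≠ [] then d.insert i [PySem.List.pyGetD v 0 0, PySem.List.pyGetD l2 i 0]
        else d.insert i [PySem.List.pyGetD l2 i 0]
      | none => d.insert i [PySem.List.pyGetD l2 i 0]
    else d) odds
  odds.items

-- ===== PORT B =====
def merge_odds_alt (l1 : List Int) (l2 : List Int) : List (Int × List Int) :=
  let n1 : Int := l1.length
  let n2 : Int := l2.length
  let pairs :=
    ((PySem.List.enumerate l1).filter (fun p => PySem.Int.mod p.2 2 != 0)).map
      (fun p => (p.1, [p.2] ++
        (if p.1 < n2 ∧ PySem.Int.mod (PySem.List.pyGetD l2 p.1 0) 2 ≠ 0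
         then [PySem.List.pyGetD l2 p.1 0] else [])))
  let pairs := pairs ++
    ((PySem.List.enumerate l2).filter (fun p =>
        PySem.Int.mod p.2 2 != 0 &&
        !(decide (p.1 < n1) && (PySem.Int.mod (PySem.List.pyGetD l1 p.1 0) 2 != 0)))).map
      (fun p => (p.1, [p.2]))
  (PySem.Dict.ofList pairs).items

-- ===== PRECONDITION & SPEC =====
def Spec_merge_odds (l1 : List Int) (l2 : List Int) (out : List (Int × List Int)) : Prop := out = merge_odds_alt l1 l2
instance (l1 : List Int) (l2 : List Int) (out : List (Int × List Int)) : Decidable (Spec_merge_odds l1 l2 out) := by unfold Spec_merge_odds; infer_instance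

-- ===== CLAIM (what is proved, stated in full; the proofs are below) =====
def Claim_equal_merge_odds : Prop := ∀ (l1 : List Int) (l2 : List Int), Dom_merge_odds l1 l2 → Spec_merge_odds l1 l2 (merge_odds l1 l2)

-- ===== LEMMAS AND PROOFS =====

-- Bool test "l[k] is odd" shared by the canonical forms below
def oddb (l : List Int) (k : Nat) : Bool := PySem.Int.mod (l.getD k 0) 2 != 0

-- canonical first group after m steps of A's second loop
def p1F (l1 l2 : List Int) (m : Nat) : List (Int × List Int) :=
  ((List.range l1.length).filter (fun k => oddb l1 k)).map
    (fun (k : Nat) => ((k : Int), [l1.getD k 0] ++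
      (if (decide (k < m) && oddb l2 k) = true then [l2.getD k 0] else [])))

-- canonical second group after m steps of A's second loop
def p2F (l1 l2 : List Int) (m : Nat) : List (Int × List Int) :=
  ((List.range m).filter (fun k => oddb l2 k && !(decide (k < l1.length) && oddb l1 k))).map
    (fun (k : Nat) => ((k : Int), [l2.getD k 0]))

-- enumerate as a map over range (Int lists, default 0)
theorem enum_eq (l : List Int) (s : Int) :
    PySem.List.enumerate l s = (List.range l.length).map (fun (k : Nat) => (s + (k : Int), l.getD k 0)) := by
  induction l generalizing s with
  | nil => simp [PySem.List.enumerate_nil]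
  | cons x xs ih =>
    rw [PySem.List.enumerate_cons, ih (s + 1), List.length_cons, List.range_succ_eq_map]
    simp only [List.map_cons, List.map_map]
    refine List.cons_eq_cons.mpr ⟨by simp, ?_⟩
    apply List.map_congr_left
    intro k _
    simp only [Function.comp_apply, Nat.succ_eq_add_one, List.getD_cons_succ]
    refine Prod.ext ?_ rfl
    push_cast
    ring

-- keys of the canonical form are distinct
theorem keys_nodup (l1 l2 : List Int) (m : Nat) :
    (((p1F l1 l2 m) ++ (p2F l1 l2 m)).map (·.1)).Nodup := by
  rw [List.map_append]
  apply List.Nodup.append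
  · unfold p1F
    rw [List.map_map]
    exact ((List.nodup_range).filter _).map (fun a b h => by
      simpa [Function.comp] using h)
  · unfold p2F
    rw [List.map_map]
    exact ((List.nodup_range).filter _).map (fun a b h => by
      simpa [Function.comp] using h)
  · intro a ha1 ha2
    unfold p1F at ha1
    unfold p2F at ha2
    simp only [List.map_map, List.mem_map, List.mem_filter, List.mem_range,
      Function.comp_apply] at ha1 ha2
    obtain ⟨k, ⟨hk, hodd1⟩, hka⟩ := ha1
    obtain ⟨j, ⟨hj, hcond⟩, hja⟩ := ha2
    have hkj : k = j := by
      have : (k : Int) = (j : Int) := by rw [hka, hja]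
      exact_mod_cast this
    subst hkj
    rw [Bool.and_eq_true, Bool.not_eq_true', Bool.and_eq_false_iff] at hcond
    rcases hcond.2 with h | h
    · simp [decide_eq_false_iff_not] at h
      omega
    · rw [hodd1] at h
      cases h

-- dict(pairs) lists exactly pairs when the keys are distinct
theorem items_ofList_nodup {κ ν : Type} [BEq κ] [LawfulBEq κ] (pairs : List (κ × ν))
    (h : (pairs.map (·.1)).Nodup) : (PySem.Dict.ofList pairs).items = pairs := by
  have := PySem.Dict.items_foldl_insert_fresh pairs Prod.fst Prod.snd PySem.Dict.empty
    (fun a _ => PySem.Dict.contains_empty a.1) h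
  simpa [PySem.Dict.ofList, PySem.Dict.update, PySem.Dict.empty] using this

-- B computes the canonical form
theorem alt_eq (l1 l2 : List Int) :
    merge_odds_alt l1 l2 = p1F l1 l2 l2.length ++ p2F l1 l2 l2.length := by
  unfold merge_odds_alt
  dsimp only
  have h1 : ((PySem.List.enumerate l1).filter (fun p => PySem.Int.mod p.2 2 != 0)).map
      (fun p => (p.1, [p.2] ++
        (if p.1 < (l2.length : Int) ∧ PySem.Int.mod (PySem.List.pyGetD l2 p.1 0) 2 ≠ 0
         then [PySem.List.pyGetD l2 p.1 0] else []))) = p1F l1 l2 l2.length := by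
    rw [enum_eq l1 0, List.filter_map, List.map_map]
    unfold p1F
    apply List.map_congr_left
    intro k hk
    simp [oddb]
  have h2 : ((PySem.List.enumerate l2).filter (fun p =>
        PySem.Int.mod p.2 2 != 0 &&
        !(decide (p.1 < (l1.length : Int)) && (PySem.Int.mod (PySem.List.pyGetD l1 p.1 0) 2 != 0)))).map
      (fun p => (p.1, [p.2])) = p2F l1 l2 l2.length := by
    rw [enum_eq l2 0, List.filter_map, List.map_map]
    unfold p2F
    have hp : ∀ k ∈ List.range l2.length,
        ((fun (p : Int × Int) => PySem.Int.mod p.2 2 != 0 &&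
          !(decide (p.1 < (l1.length : Int)) && (PySem.Int.mod (PySem.List.pyGetD l1 p.1 0) 2 != 0))) ∘
          (fun (k : Nat) => ((0 : Int) + (k : Int), l2.getD k 0))) k
        = (fun k => oddb l2 k && !(decide (k < l1.length) && oddb l1 k)) k := by
      intro k hk
      simp [oddb, Function.comp]
    rw [List.filter_congr hp]
    apply List.map_congr_left
    intro k hk
    simp
  rw [h1, h2]
  exact items_ofList_nodup _ (keys_nodup l1 l2 l2.length)

-- A's first loop
theorem loopA1 (l1 l2 : List Int) :
    ((List.range l1.length).foldl (fun (d : PySem.Dict Int (List Int)) (k : Nat) =>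
      if PySem.Int.mod (PySem.List.pyGetD l1 (k : Int) 0) 2 ≠ 0 then
        d.insert (k : Int) [PySem.List.pyGetD l1 (k : Int) 0]
      else d) PySem.Dict.empty) = PySem.Dict.mk (p1F l1 l2 0) := by
  have key : ∀ n : Nat,
      ((List.range n).foldl (fun (d : PySem.Dict Int (List Int)) (k : Nat) =>
        if PySem.Int.mod (PySem.List.pyGetD l1 (k : Int) 0) 2 ≠ 0 then
          d.insert (k : Int) [PySem.List.pyGetD l1 (k : Int) 0]
        else d) PySem.Dict.empty)
      = PySem.Dict.mk (((List.range n).filter (fun k => oddb l1 k)).map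
          (fun (k : Nat) => ((k : Int), [l1.getD k 0]))) := by
    intro n
    induction n with
    | zero => rfl
    | succ n ih =>
      rw [List.range_succ, List.foldl_append, List.foldl_cons, List.foldl_nil, ih,
        List.filter_append, List.filter_cons, List.filter_nil, List.map_append]
      by_cases h : oddb l1 n = true
      · have h' : PySem.Int.mod (PySem.List.pyGetD l1 (n : Int) 0) 2 ≠ 0 := by
          simpa [oddb] using h
        rw [if_pos h', if_pos h]
        apply PySem.Dict.ext
        rw [PySem.Dict.items_insert_of_not_contains _ _ ?hc]
        case hc =>
          rw [PySem.Dict.contains_mk]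
          simp only [List.any_eq_false]
          rintro ⟨a, b⟩ hab
          simp only [List.mem_map, List.mem_filter, List.mem_range] at hab
          obtain ⟨k, ⟨hk, -⟩, hpair⟩ := hab
          cases hpair
          simp
          omega
        simp [PySem.List.pyGetD_natCast]
      · have h' : ¬ (PySem.Int.mod (PySem.List.pyGetD l1 (n : Int) 0) 2 ≠ 0) := by
          simpa [oddb] using h
        rw [if_neg h', if_neg (by simp [h])]
        simp
  rw [key l1.length]
  unfold p1F
  congr 1

-- A's second loop invariant
theorem loopA2 (l1 l2 : List Int) (m : Nat) :
    ((List.range m).foldl (fun (d : PySem.Dict Int (List Int)) (k : Nat) =>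
      if PySem.Int.mod (PySem.List.pyGetD l2 (k : Int) 0) 2 ≠ 0 then
        match d.get? (k : Int) with
        | some v =>
          if v ≠ [] then d.insert (k : Int) [PySem.List.pyGetD v 0 0, PySem.List.pyGetD l2 (k : Int) 0]
          else d.insert (k : Int) [PySem.List.pyGetD l2 (k : Int) 0]
        | none => d.insert (k : Int) [PySem.List.pyGetD l2 (k : Int) 0]
      else d) (PySem.Dict.mk (p1F l1 l2 0))) = PySem.Dict.mk (p1F l1 l2 m ++ p2F l1 l2 m) := by
  induction m with
  | zero => simp [p2F]
  | succ m ih =>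
    rw [List.range_succ, List.foldl_append, List.foldl_cons, List.foldl_nil, ih]
    by_cases h2 : oddb l2 m = true
    · have h2' : PySem.Int.mod (PySem.List.pyGetD l2 (m : Int) 0) 2 ≠ 0 := by
        simpa [oddb] using h2
      rw [if_pos h2']
      by_cases hb : m < l1.length ∧ oddb l1 m = true
      · -- key m is present with value [l1.getD m 0]; A overwrites it in place
        have hmem : ((m : Int), [l1.getD m 0] ++
            (if (decide (m < m) && oddb l2 m) = true then [l2.getD m 0] else []))
            ∈ (p1F l1 l2 m ++ p2F l1 l2 m) := by
          apply List.mem_append_left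
          unfold p1F
          exact List.mem_map_of_mem (List.mem_filter.mpr ⟨List.mem_range.mpr hb.1, hb.2⟩)
        have hval : [l1.getD m 0] ++
            (if (decide (m < m) && oddb l2 m) = true then [l2.getD m 0] else []) = [l1.getD m 0] := by
          simp
        have hget : (PySem.Dict.mk (p1F l1 l2 m ++ p2F l1 l2 m)).get? (m : Int)
            = some [l1.getD m 0] := by
          rw [← hval]
          exact PySem.Dict.get?_of_mem_items _ hmem (keys_nodup l1 l2 m)
        rw [hget]
        have hcont : (PySem.Dict.mk (p1F l1 l2 m ++ p2F l1 l2 m)).contains (m : Int) = true := by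
          rw [PySem.Dict.contains_eq_decide_mem_keys]
          rw [← hval] at hmem
          exact decide_eq_true (List.mem_map_of_mem hmem)
        simp only [ne_eq, List.cons_ne_nil, not_false_iff, if_true]
        apply PySem.Dict.ext
        rw [PySem.Dict.items_insert_of_contains _ _ hcont, List.map_append]
        have e1 : (p1F l1 l2 m).map (fun p => if (p.1 == (m : Int)) = true
              then ((m : Int), [PySem.List.pyGetD [l1.getD m 0] 0 0, PySem.List.pyGetD l2 (m : Int) 0]) else p)
            = p1F l1 l2 (m + 1) := by
          unfold p1F
          rw [List.map_map]
          apply List.map_congr_left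
          intro k hk
          simp only [Function.comp_apply]
          by_cases hkm : k = m
          · subst hkm
            simp [h2, PySem.List.pyGetD_zero_cons]
          · have : ((k : Int) == (m : Int)) = false := by
              simp only [beq_eq_false_iff_ne, ne_eq, Nat.cast_inj]; exact hkm
            rw [if_neg (by simp [this])]
            have : (k < m + 1) = (k < m) := by
              apply propext; omega
            simp [this]
        have e2 : (p2F l1 l2 m).map (fun p => if (p.1 == (m : Int)) = true
              then ((m : Int), [PySem.List.pyGetD [l1.getD m 0] 0 0, PySem.List.pyGetD l2 (m : Int) 0]) else p)
            = p2F l1 l2 (m + 1) := by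
          unfold p2F
          rw [List.map_map, List.range_succ, List.filter_append, List.filter_cons, List.filter_nil]
          have hc : (oddb l2 m && !(decide (m < l1.length) && oddb l1 m)) = false := by
            simp [hb.1, hb.2]
          rw [hc]
          simp only [Bool.false_eq_true, if_neg (by simp : ¬ False), List.append_nil]
          apply List.map_congr_left
          intro j hj
          have hjm : j < m := (List.mem_range.mp (List.mem_filter.mp hj).1)
          simp only [Function.comp_apply]
          rw [if_neg]
          simp only [beq_iff_eq, Nat.cast_inj]
          omega
        rw [e1, e2]
      · -- key m absent: A appends a fresh entry
        have hnk : (m : Int) ∉ ((p1F l1 l2 m ++ p2F l1 l2 m).map (·.1)) := by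
          intro hmem
          rw [List.map_append, List.mem_append] at hmem
          rcases hmem with hmem | hmem
          · unfold p1F at hmem
            rw [List.map_map] at hmem
            obtain ⟨k, hk, hke⟩ := List.mem_map.mp hmem
            have hk' := List.mem_filter.mp hk
            have hkm : k = m := by simpa [Function.comp] using hke
            subst hkm
            exact hb ⟨List.mem_range.mp hk'.1, hk'.2⟩
          · unfold p2F at hmem
            rw [List.map_map] at hmem
            obtain ⟨j, hj, hje⟩ := List.mem_map.mp hmem
            have hjm : j < m := List.mem_range.mp (List.mem_filter.mp hj).1
            have : j = m := by simpa [Function.comp] using hje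
            omega
        have hget : (PySem.Dict.mk (p1F l1 l2 m ++ p2F l1 l2 m)).get? (m : Int) = none :=
          (PySem.Dict.get?_eq_none_iff_not_mem_keys _ _).mpr hnk
        rw [hget]
        have hcont : (PySem.Dict.mk (p1F l1 l2 m ++ p2F l1 l2 m)).contains (m : Int) = false := by
          rw [PySem.Dict.contains_eq_decide_mem_keys]
          exact decide_eq_false hnk
        apply PySem.Dict.ext
        rw [PySem.Dict.items_insert_of_not_contains _ _ hcont]
        have e1 : p1F l1 l2 (m + 1) = p1F l1 l2 m := by
          unfold p1F
          apply List.map_congr_left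
          intro k hk
          have hk' := List.mem_filter.mp hk
          have hkm : k ≠ m := by
            intro he; subst he
            exact hb ⟨List.mem_range.mp hk'.1, hk'.2⟩
          have : (k < m + 1) = (k < m) := by apply propext; omega
          simp [this]
        have e2 : p2F l1 l2 (m + 1) = p2F l1 l2 m ++ [((m : Int), [l2.getD m 0])] := by
          unfold p2F
          rw [List.range_succ, List.filter_append, List.filter_cons, List.filter_nil]
          have hc : (oddb l2 m && !(decide (m < l1.length) && oddb l1 m)) = true := by
            rcases Decidable.not_and_iff_or_not.mp hb with h | h
            · simp [h2, h]
            · simp [h2, h]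
          rw [hc]
          simp
        rw [e1, e2, List.append_assoc]
        simp
    · have h2' : ¬ (PySem.Int.mod (PySem.List.pyGetD l2 (m : Int) 0) 2 ≠ 0) := by
        simpa [oddb] using h2
      rw [if_neg h2']
      have e1 : p1F l1 l2 (m + 1) = p1F l1 l2 m := by
        unfold p1F
        apply List.map_congr_left
        intro k hk
        by_cases hkm : k = m
        · subst hkm
          simp [h2]
        · have : (k < m + 1) = (k < m) := by apply propext; omega
          simp [this]
      have e2 : p2F l1 l2 (m + 1) = p2F l1 l2 m := by
        unfold p2F
        rw [List.range_succ, List.filter_append, List.filter_cons, List.filter_nil]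
        simp [h2]
      rw [e1, e2]

-- ===== VERDICT (by name: the statement is the Claim_ definition above) =====
theorem merge_odds_spec : Claim_equal_merge_odds := by
  unfold Claim_equal_merge_odds Spec_merge_odds
  intro l1 l2 _
  show merge_odds l1 l2 = merge_odds_alt l1 l2
  rw [alt_eq]
  unfold merge_odds
  rw [PySem.List.pyRange_one, PySem.List.pyRange_one]
  simp only [Int.sub_zero, Int.toNat_natCast, List.foldl_map, Int.zero_add]
  rw [loopA1 l1 l2, loopA2 l1 l2 l2.length]
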